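-- pv_equiv track=rewrite | github.com/nishhub/EasyLevelPythonPrograms | AlgoSpecific/SumOfSimilarityOfStringwithAllSuffix.py | sumSimilarity
-- ===== SOURCE A (Python) =====
-- def stringSimilarity(s, n , Z):
--     l = r = 0
--     for i in range(1, n):
--         if i > r:
--             l = r = i
--             while r < n and s[r] == s[r-l]:
--                 r += 1
--             Z[i] = r -l
--             r -= 1
--
--         else:
--             k = i -l
--             if Z[k] < r-i+1:
--                 Z[i] = Z[k]
--             else:
--                 l = i
--                 while r < n and s[r] == s[r-l]:
--                     r += 1
--                 Z[i] = r-l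
--                 r -= 1
--     return Z
--
-- def sumSimilarity(s):
--     n = len(s)
--     Z = [0 for i in range(n)]
--     stringSimilarity(s, n, Z)
--     total = n
--     for i in range(n):
--         total += Z[i]
--     return total
-- ===== SOURCE B (Python) =====
-- def sumSimilarity(s):
--     n = len(s)
--     total = 0
--     for i in range(n):
--         j = 0
--         while i + j < n and s[j] == s[i + j]:
--             j += 1
--         total += j
--     return total
-- ===== Notes on version B (the rewrite author's own statement) =====
-- stated objective: simpler
-- what changed: Replaces the Z-algorithm (l/r window maintenance plus an auxiliary Z array) with a direct per-suffix longest-common-prefix comparison loop summed over all start positions.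
import Mathlib
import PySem

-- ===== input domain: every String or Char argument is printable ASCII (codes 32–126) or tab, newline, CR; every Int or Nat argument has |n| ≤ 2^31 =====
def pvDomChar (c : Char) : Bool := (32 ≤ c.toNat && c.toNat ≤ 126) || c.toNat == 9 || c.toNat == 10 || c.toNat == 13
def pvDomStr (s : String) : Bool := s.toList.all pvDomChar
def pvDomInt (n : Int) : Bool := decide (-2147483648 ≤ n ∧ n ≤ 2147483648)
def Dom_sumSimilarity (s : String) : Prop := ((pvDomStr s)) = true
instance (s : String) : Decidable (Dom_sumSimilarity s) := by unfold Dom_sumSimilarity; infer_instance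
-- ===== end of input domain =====

-- B replaces the Z-algorithm with a direct per-suffix longest-common-prefix comparison loop
-- (objective: simpler); return values proved equal on all inputs.

-- ===== PORT A =====
-- the inner `while r < n and s[r] == s[r-l]: r += 1` loop of stringSimilarity
-- (the `r < n` guard precedes each access, so `getD` defaults are never consulted)
def zextend (cs : List Char) (n l r : Nat) : Nat :=
  if _ : r < n then
    if cs.getD r 'A' = cs.getD (r - l) 'A' then zextend cs n l (r + 1) else r
  else r
termination_by n - r

-- one iteration of the `for i in range(1, n)` loop of stringSimilarity; state (l, r, Z)
def zstep (cs : List Char) (n : Nat) (st : Nat × Nat × List Nat) (i : Nat) :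
    Nat × Nat × List Nat :=
  match st with
  | (l, r, Z) =>
    if r < i then            -- Python: if i > r
      let r' := zextend cs n i i
      (i, r' - 1, Z.set i (r' - i))
    else
      let k := i - l
      if Z.getD k 0 < r - i + 1 then
        (l, r, Z.set i (Z.getD k 0))
      else
        let r' := zextend cs n i r
        (i, r' - 1, Z.set i (r' - i))

def sumSimilarity (s : String) : Int :=
  let cs := s.toList
  let n := cs.length
  let Z0 := List.replicate n 0          -- Z = [0 for i in range(n)]
  let res := (List.range' 1 (n - 1)).foldl (zstep cs n) (0, 0, Z0)  -- stringSimilarity(s, n, Z)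
  (List.range n).foldl (fun t i => t + ((res.2.2.getD i 0 : Nat) : Int)) (n : Int)

-- ===== PORT B =====
-- the inner `while i + j < n and s[j] == s[i+j]: j += 1` loop of B, as the common-prefix
-- length of cs and cs.drop i
def pvLcp : List Char → List Char → Nat
  | a :: as, b :: bs => if a = b then pvLcp as bs + 1 else 0
  | _, _ => 0

def sumSimilarity_alt (s : String) : Int :=
  let cs := s.toList
  (List.range cs.length).foldl (fun t i => t + ((pvLcp cs (cs.drop i) : Nat) : Int)) 0

-- ===== PRECONDITION & SPEC =====
def Spec_sumSimilarity (s : String) (out : Int) : Prop := out = sumSimilarity_alt s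
instance (s : String) (out : Int) : Decidable (Spec_sumSimilarity s out) := by unfold Spec_sumSimilarity; infer_instance

-- ===== CLAIM (what is proved, stated in full; the proofs are below) =====
def Claim_equal_sumSimilarity : Prop := ∀ (s : String), Dom_sumSimilarity s → Spec_sumSimilarity s (sumSimilarity s)

-- ===== LEMMAS AND PROOFS =====

-- Z-function value at i: length of the longest common prefix of cs and cs.drop i
def zfun (cs : List Char) (i : Nat) : Nat := pvLcp cs (cs.drop i)

theorem pvLcp_le_right (a b : List Char) : pvLcp a b ≤ b.length := by
  induction a generalizing b with
  | nil => simp [pvLcp]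
  | cons x as ih =>
    cases b with
    | nil => simp [pvLcp]
    | cons y bs =>
      simp only [pvLcp, List.length_cons]
      split
      · have := ih bs; omega
      · omega

theorem pvLcp_refl (a : List Char) : pvLcp a a = a.length := by
  induction a with
  | nil => rfl
  | cons x as ih => simp [pvLcp, ih]

theorem pvLcp_get (a b : List Char) (t : Nat) (h : t < pvLcp a b) :
    a.getD t 'A' = b.getD t 'A' := by
  induction a generalizing b t with
  | nil => simp [pvLcp] at h
  | cons x as ih =>
    cases b with
    | nil => simp [pvLcp] at h
    | cons y bs =>
      simp only [pvLcp] at h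
      split at h
      · cases t with
        | zero => simpa using ‹x = y›
        | succ t' => simpa using ih bs t' (by omega)
      · omega

theorem pvLcp_mismatch (a b : List Char) (ha : pvLcp a b < a.length)
    (hb : pvLcp a b < b.length) : a.getD (pvLcp a b) 'A' ≠ b.getD (pvLcp a b) 'A' := by
  induction a generalizing b with
  | nil => simp at ha
  | cons x as ih =>
    cases b with
    | nil => simp at hb
    | cons y bs =>
      by_cases hxy : x = y
      · subst hxy
        have hp : pvLcp (x :: as) (x :: bs) = pvLcp as bs + 1 := by simp [pvLcp]
        rw [hp] at ha hb ⊢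
        rw [List.getD_cons_succ, List.getD_cons_succ]
        exact ih bs (by simp at ha; omega) (by simp at hb; omega)
      · simp only [pvLcp, if_neg hxy, List.getD_cons_zero]
        exact hxy

theorem getD_drop (cs : List Char) (i t : Nat) :
    (cs.drop i).getD t 'A' = cs.getD (i + t) 'A' := by
  simp [List.getD_eq_getElem?_getD, List.getElem?_drop]

theorem zfun_le (cs : List Char) (i : Nat) : zfun cs i ≤ cs.length - i := by
  have h2 := pvLcp_le_right cs (cs.drop i)
  rw [List.length_drop] at h2
  exact h2

theorem zfun_match (cs : List Char) (i t : Nat) (h : t < zfun cs i) :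
    cs.getD t 'A' = cs.getD (i + t) 'A' := by
  have := pvLcp_get cs (cs.drop i) t h
  rwa [getD_drop] at this

theorem zfun_mismatch (cs : List Char) (i : Nat) (h : i + zfun cs i < cs.length) :
    cs.getD (zfun cs i) 'A' ≠ cs.getD (i + zfun cs i) 'A' := by
  unfold zfun at h ⊢
  have hb : pvLcp cs (cs.drop i) < (cs.drop i).length := by
    rw [List.length_drop]; omega
  have ha : pvLcp cs (cs.drop i) < cs.length := by omega
  have hm := pvLcp_mismatch cs (cs.drop i) ha hb
  rwa [getD_drop] at hm

theorem zfun_unique (cs : List Char) (i j : Nat) (hi : i ≤ cs.length)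
    (hj : i + j ≤ cs.length)
    (hm : ∀ t, t < j → cs.getD t 'A' = cs.getD (i + t) 'A')
    (hend : i + j = cs.length ∨ cs.getD j 'A' ≠ cs.getD (i + j) 'A') :
    zfun cs i = j := by
  rcases Nat.lt_trichotomy (zfun cs i) j with h | h | h
  · exfalso
    have hlt : i + zfun cs i < cs.length := by omega
    exact zfun_mismatch cs i hlt (hm _ h)
  · exact h
  · exfalso
    have hz : zfun cs i ≤ cs.length - i := zfun_le cs i
    have hmt := zfun_match cs i j h
    rcases hend with he | hne
    · omega
    · exact hne hmt

theorem zextend_ge (cs : List Char) (n l r : Nat) : r ≤ zextend cs n l r := by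
  unfold zextend
  split
  next h =>
    split
    next h2 =>
      have ih := zextend_ge cs n l (r + 1)
      omega
    next h2 => omega
  next h => omega
termination_by n - r
decreasing_by omega

theorem zextend_le (cs : List Char) (n l r : Nat) (h : r ≤ n) : zextend cs n l r ≤ n := by
  unfold zextend
  split
  next h1 =>
    split
    next h2 =>
      have ih := zextend_le cs n l (r + 1) (by omega)
      omega
    next h2 => omega
  next h1 => omega
termination_by n - r
decreasing_by omega

theorem zextend_spec (cs : List Char) (n l r : Nat) (h : r ≤ n) :
    (∀ u, r ≤ u → u < zextend cs n l r → cs.getD u 'A' = cs.getD (u - l) 'A') ∧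
    (zextend cs n l r = n ∨
      cs.getD (zextend cs n l r) 'A' ≠ cs.getD (zextend cs n l r - l) 'A') := by
  unfold zextend
  split
  next h1 =>
    split
    next h2 =>
      have ih := zextend_spec cs n l (r + 1) (by omega)
      refine ⟨fun u hu1 hu2 => ?_, ih.2⟩
      rcases Nat.eq_or_lt_of_le hu1 with he | hl
      · subst he; exact h2
      · exact ih.1 u hl hu2
    next h2 =>
      exact ⟨fun u hu1 hu2 => by omega, Or.inr h2⟩
  next h1 =>
    exact ⟨fun u hu1 hu2 => by omega, Or.inl (by omega)⟩
termination_by n - r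
decreasing_by omega

theorem zextend_zfun (cs : List Char) (l r : Nat) (hl : l ≤ r) (hr : r ≤ cs.length)
    (hm : ∀ t, l + t < r → cs.getD (l + t) 'A' = cs.getD t 'A') :
    zextend cs cs.length l r = l + zfun cs l := by
  set n := cs.length with hn
  set R := zextend cs n l r with hR
  have hge : r ≤ R := zextend_ge cs n l r
  have hle : R ≤ n := zextend_le cs n l r hr
  have hspec := zextend_spec cs n l r hr
  have hmatch : ∀ t, t < R - l → cs.getD t 'A' = cs.getD (l + t) 'A' := by
    intro t ht
    by_cases hc : l + t < r
    · exact (hm t hc).symm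
    · have h1 := hspec.1 (l + t) (by omega) (by omega)
      rw [Nat.add_sub_cancel_left] at h1
      exact h1.symm
  have hend : l + (R - l) = n ∨ cs.getD (R - l) 'A' ≠ cs.getD (l + (R - l)) 'A' := by
    rcases hspec.2 with he | hne
    · left; omega
    · right
      have : l + (R - l) = R := by omega
      rw [this]
      exact fun h => hne (h.symm)
  have := zfun_unique cs l (R - l) (by omega) (by omega) hmatch hend
  omega

-- getD of List.set
theorem getD_set (Z : List Nat) (i j v : Nat) (hi : i < Z.length) :
    (Z.set i v).getD j 0 = if j = i then v else Z.getD j 0 := by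
  split
  · next h => subst h; simp [List.getD_eq_getElem?_getD, hi]
  · next h =>
      rw [List.getD_eq_getElem?_getD, List.getD_eq_getElem?_getD,
        List.getElem?_set_ne (fun he => h he.symm)]

-- loop invariant for stringSimilarity's main loop, state (l, r, Z), about to process index i
def ZInv (cs : List Char) (i : Nat) (st : Nat × Nat × List Nat) : Prop :=
  st.2.2.length = cs.length ∧
  st.1 < i ∧
  (st.1 = 0 → st.2.1 = 0) ∧
  st.2.1 + 1 ≤ st.1 + zfun cs st.1 ∧
  (∀ j, j < i → st.2.2.getD j 0 = if j = 0 then 0 else zfun cs j)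

theorem zstep_inv (cs : List Char) (i : Nat) (st : Nat × Nat × List Nat)
    (h1 : 1 ≤ i) (h2 : i < cs.length) (hinv : ZInv cs i st) :
    ZInv cs (i + 1) (zstep cs cs.length st i) := by
  obtain ⟨l, r, Z⟩ := st
  obtain ⟨hlen, hli, hl0, hwin, hZ⟩ := hinv
  simp only [ZInv] at *
  set n := cs.length with hn
  have hzle : zfun cs l ≤ n - l := zfun_le cs l
  have hln : l ≤ n := by omega
  have hrn : r < n := by omega
  -- window match: positions l ≤ u ≤ r agree with the prefix
  have hwm : ∀ t, l + t ≤ r → cs.getD (l + t) 'A' = cs.getD t 'A' := by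
    intro t ht
    exact (zfun_match cs l t (by omega)).symm
  simp only [zstep]
  by_cases hbr : r < i
  · -- branch i > r: fresh extension from i
    rw [if_pos hbr]
    dsimp only
    have hz := zextend_zfun cs i i (le_refl i) (by omega) (fun t ht => by omega)
    have hzi : zfun cs i ≤ n - i := zfun_le cs i
    refine ⟨by simpa using hlen, by omega, by omega, by rw [hz]; omega, ?_⟩
    intro j hj
    rw [getD_set Z i j _ (by omega)]
    by_cases hji : j = i
    · subst hji; rw [if_pos rfl, hz, if_neg (by omega)]; omega
    · rw [if_neg hji]; exact hZ j (by omega)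
  · -- branch i ≤ r
    rw [if_neg hbr]
    have hir : i ≤ r := by omega
    have hl1 : 1 ≤ l := by
      by_contra hc
      have : l = 0 := by omega
      have := hl0 this
      omega
    set k := i - l with hk
    have hk1 : 1 ≤ k := by omega
    have hki : k < i := by omega
    have hZk : Z.getD k 0 = zfun cs k := by
      rw [hZ k hki, if_neg (by omega)]
    by_cases hcase : Z.getD k 0 < r - i + 1
    · rw [if_pos hcase]
      dsimp only
      rw [hZk] at hcase
      -- zfun i = zfun k
      set z := zfun cs k with hz
      have hzr : i + z ≤ r := by omega
      have hmatch : ∀ t, t < z → cs.getD t 'A' = cs.getD (i + t) 'A' := by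
        intro t ht
        have e1 : cs.getD t 'A' = cs.getD (k + t) 'A' := zfun_match cs k t ht
        have e2 : cs.getD (l + (k + t)) 'A' = cs.getD (k + t) 'A' := hwm (k + t) (by omega)
        have e3 : l + (k + t) = i + t := by omega
        rw [e3] at e2
        exact e1.trans e2.symm
      have hkz : k + z < n := by omega
      have hmis : cs.getD (i + z) 'A' ≠ cs.getD z 'A' := by
        have e2 : cs.getD (l + (k + z)) 'A' = cs.getD (k + z) 'A' := hwm (k + z) (by omega)
        have e3 : l + (k + z) = i + z := by omega
        rw [e3] at e2
        rw [e2]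
        exact fun h => zfun_mismatch cs k (by rw [← hz]; omega) h.symm
      have hzi : zfun cs i = z :=
        zfun_unique cs i z (by omega) (by omega) hmatch (Or.inr (fun h => hmis h.symm))
      refine ⟨by simpa using hlen, by omega, hl0, hwin, ?_⟩
      intro j hj
      rw [getD_set Z i j _ (by omega)]
      by_cases hji : j = i
      · subst hji; rw [if_pos rfl, hZk, if_neg (by omega), hzi]
      · rw [if_neg hji]; exact hZ j (by omega)
    · rw [if_neg hcase]
      dsimp only
      rw [hZk] at hcase
      -- extend from r with l := i
      have hpre : ∀ t, i + t < r → cs.getD (i + t) 'A' = cs.getD t 'A' := by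
        intro t ht
        have e2 : cs.getD (l + (k + t)) 'A' = cs.getD (k + t) 'A' := hwm (k + t) (by omega)
        have e3 : l + (k + t) = i + t := by omega
        rw [e3] at e2
        rw [e2]
        exact (zfun_match cs k t (by omega)).symm
      have hz := zextend_zfun cs i r hir (by omega) hpre
      have hzi : zfun cs i ≤ n - i := zfun_le cs i
      refine ⟨by simpa using hlen, by omega, by omega, by rw [hz]; omega, ?_⟩
      intro j hj
      rw [getD_set Z i j _ (by omega)]
      by_cases hji : j = i
      · subst hji; rw [if_pos rfl, hz, if_neg (by omega)]; omega
      · rw [if_neg hji]; exact hZ j (by omega)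

theorem foldl_range'_inv {α : Type} (step : α → Nat → α) (P : Nat → α → Prop)
    (a len : Nat) (st : α) (h0 : P a st)
    (hstep : ∀ i s, a ≤ i → i < a + len → P i s → P (i + 1) (step s i)) :
    P (a + len) ((List.range' a len).foldl step st) := by
  induction len generalizing a st with
  | zero => simpa using h0
  | succ m ih =>
    rw [List.range'_succ, List.foldl_cons]
    have := ih (a + 1) (step st a) (hstep a st (le_refl a) (by omega)
      h0) (fun i s hi1 hi2 hp => hstep i s (by omega) (by omega) hp)
    have he : a + 1 + m = a + (m + 1) := by omega
    rwa [he] at this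

theorem sumSimilarity_eq (s : String) : sumSimilarity s = sumSimilarity_alt s := by
  unfold sumSimilarity sumSimilarity_alt
  set cs := s.toList with hcs
  set n := cs.length with hn
  by_cases hn0 : n = 0
  · have h0 : cs.length = 0 := by omega
    simp [h0]
  · have hn1 : 1 ≤ n := by omega
    have hInit : ZInv cs 1 (0, 0, List.replicate n 0) := by
      unfold ZInv
      dsimp only
      refine ⟨by simp [hn], by omega, fun _ => rfl, ?_, ?_⟩
      · have hzz : zfun cs 0 = cs.length := by
          unfold zfun; rw [List.drop_zero, pvLcp_refl]
        omega
      · intro j hj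
        have hj0 : j = 0 := by omega
        subst hj0
        rw [List.getD_eq_getElem?_getD, List.getElem?_replicate, if_pos (by omega)]
        rfl
    have hfin : ZInv cs (1 + (n - 1)) ((List.range' 1 (n - 1)).foldl (zstep cs n) (0, 0, List.replicate n 0)) :=
      foldl_range'_inv (zstep cs n) (ZInv cs) 1 (n - 1) _ hInit
        (fun i st hi1 hi2 hp => zstep_inv cs i st hi1 (by omega) hp)
    have hfn : 1 + (n - 1) = n := by omega
    rw [hfn] at hfin
    obtain ⟨-, -, -, -, hZ⟩ := hfin
    set Z := ((List.range' 1 (n - 1)).foldl (zstep cs n) (0, 0, List.replicate n 0)).2.2 with hZdef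
    -- turn both folds into sums
    rw [PySem.List.foldl_add, PySem.List.foldl_add]
    have hr : List.range n = 0 :: List.range' 1 (n - 1) := by
      obtain ⟨m, hm⟩ : ∃ m, n = m + 1 := ⟨n - 1, by omega⟩
      rw [hm, List.range_eq_range', List.range'_succ]
      simp
    rw [hr]
    simp only [List.map_cons, List.sum_cons]
    have hmap : (List.range' 1 (n - 1)).map (fun i => ((Z.getD i 0 : Nat) : Int)) =
        (List.range' 1 (n - 1)).map (fun i => ((pvLcp cs (cs.drop i) : Nat) : Int)) := by
      apply List.map_congr_left
      intro i hi
      rw [List.mem_range'] at hi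
      obtain ⟨i0, hi0, he⟩ := hi
      have hi1 : 1 ≤ i := by omega
      have hi2 : i < n := by omega
      rw [hZ i hi2, if_neg (by omega)]
      rfl
    rw [hmap]
    have hz0 : ((pvLcp cs (cs.drop 0) : Nat) : Int) = (n : Int) := by
      simp [pvLcp_refl, hn]
    rw [hz0]
    have hg0 : ((Z.getD 0 0 : Nat) : Int) = 0 := by
      rw [hZ 0 (by omega), if_pos rfl]; simp
    rw [hg0]
    ring

-- ===== VERDICT (by name: the statement is the Claim_ definition above) =====
theorem sumSimilarity_spec : Claim_equal_sumSimilarity := by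
  intro s _
  unfold Spec_sumSimilarity
  exact sumSimilarity_eq s
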